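-- pv_equiv track=rewrite | github.com/Dr-Strange-07/SDA-Project-2026 | Phase 3/main.py | _resolve_internal_fields
-- ===== SOURCE A (Python) =====
-- from typing import Dict
--
-- def _resolve_internal_fields(schema_columns, verify_conf: Dict, stateful_conf: Dict) -> Dict[str, str]:
--     mapped_fields = [c.get("internal_mapping") for c in schema_columns if c.get("internal_mapping")]
--
--     def first_with(tokens, fallback=""):
--         for field in mapped_fields:
--             lowered = field.lower()
--             if any(token in lowered for token in tokens):
--                 return field
--         return fallback
--
--     entity_field = first_with(["entity", "name"], "entity_name")
--     time_field = first_with(["time", "timestamp", "period"], "time_period")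
--     value_field = (
--         verify_conf.get("value_field")
--         or stateful_conf.get("value_field")
--         or first_with(["metric", "value", "amount"], "metric_value")
--     )
--     signature_field = verify_conf.get("signature_field") or first_with(["sign", "hash", "auth"], "security_hash")
--     computed_field = stateful_conf.get("computed_field", "computed_metric")
--
--     return {
--         "entity_field": entity_field,
--         "time_field": time_field,
--         "value_field": value_field,
--         "signature_field": signature_field,
--         "computed_field": computed_field,
--     }
-- ===== SOURCE B (Python) =====
-- def _resolve_internal_fields(schema_columns, verify_conf, stateful_conf):
--     # Single pass: compute lower() once per mapped field and fill each
--     # category's slot with the first matching field.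
--     ent = tim = met = sig = None
--     for c in schema_columns:
--         field = c.get("internal_mapping")
--         if not field:
--             continue
--         lowered = field.lower()
--         if ent is None and ("entity" in lowered or "name" in lowered):
--             ent = field
--         if tim is None and ("time" in lowered or "timestamp" in lowered or "period" in lowered):
--             tim = field
--         if met is None and ("metric" in lowered or "value" in lowered or "amount" in lowered):
--             met = field
--         if sig is None and ("sign" in lowered or "hash" in lowered or "auth" in lowered):
--             sig = field
--     return {
--         "entity_field": ent if ent is not None else "entity_name",
--         "time_field": tim if tim is not None else "time_period",
--         "value_field": (verify_conf.get("value_field")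
--                         or stateful_conf.get("value_field")
--                         or (met if met is not None else "metric_value")),
--         "signature_field": (verify_conf.get("signature_field")
--                             or (sig if sig is not None else "security_hash")),
--         "computed_field": stateful_conf.get("computed_field", "computed_metric"),
--     }
-- ===== Notes on version B (the rewrite author's own statement) =====
-- stated objective: alternative
-- what changed: Replaces the four separate first_with scans over mapped_fields (each re-lowering every field) with a single pass over schema_columns that lowers each field once and fills the first-match slot of each of the four token categories, then applies the same config-precedence fallbacks.
import Mathlib
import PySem

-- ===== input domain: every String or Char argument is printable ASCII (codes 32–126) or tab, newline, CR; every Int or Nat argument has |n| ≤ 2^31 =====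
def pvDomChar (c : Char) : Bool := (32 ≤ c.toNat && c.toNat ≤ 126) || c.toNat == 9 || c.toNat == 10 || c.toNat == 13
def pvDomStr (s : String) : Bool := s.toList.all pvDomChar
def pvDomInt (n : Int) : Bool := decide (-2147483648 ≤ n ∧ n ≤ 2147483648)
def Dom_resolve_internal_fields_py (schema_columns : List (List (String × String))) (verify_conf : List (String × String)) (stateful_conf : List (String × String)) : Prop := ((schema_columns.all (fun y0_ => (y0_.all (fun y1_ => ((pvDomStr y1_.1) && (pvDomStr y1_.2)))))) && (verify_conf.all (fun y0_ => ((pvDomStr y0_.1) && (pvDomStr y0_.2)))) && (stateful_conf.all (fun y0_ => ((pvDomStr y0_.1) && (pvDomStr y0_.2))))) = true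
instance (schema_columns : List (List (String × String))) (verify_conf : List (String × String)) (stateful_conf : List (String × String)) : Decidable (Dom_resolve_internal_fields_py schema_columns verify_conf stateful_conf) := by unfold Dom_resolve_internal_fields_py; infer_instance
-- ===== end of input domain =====

-- B replaces A's four separate first_with scans with one pass over schema_columns
-- that lowers each mapped field once and fills a first-match slot per category
-- (objective: alternative decomposition, same result).

-- ===== PORT A =====

-- c.get("internal_mapping"), kept only when truthy (not None, not "")
def pvExtract (c : List (String × String)) : Option String :=
  match (PySem.Dict.mk c).get? "internal_mapping" with
  | some f => if f = "" then none else some f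
  | none => none

-- the list comprehension over schema_columns
def pvMapped (cols : List (List (String × String))) : List String :=
  cols.filterMap pvExtract

-- A's inner helper first_with(tokens, fallback)
def pvFirstWith (mapped : List String) (tokens : List String) (fallback : String) : String :=
  match mapped with
  | [] => fallback
  | f :: rest =>
    let lowered := PySem.Str.lower f
    if tokens.any (fun t => PySem.Str.isIn t lowered) then f
    else pvFirstWith rest tokens fallback

-- Python's `opt or s` where opt is a dict .get(...) result (None / "" are falsy)
def pvOrStr (o : Option String) (y : String) : String :=
  match o with
  | some s => if s = "" then y else s
  | none => y

def resolve_internal_fields_py (schema_columns : List (List (String × String))) (verify_conf : List (String × String)) (stateful_conf : List (String × String)) : List (String × String) :=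
  let mapped := pvMapped schema_columns
  let entity_field := pvFirstWith mapped ["entity", "name"] "entity_name"
  let time_field := pvFirstWith mapped ["time", "timestamp", "period"] "time_period"
  let value_field :=
    pvOrStr ((PySem.Dict.mk verify_conf).get? "value_field")
      (pvOrStr ((PySem.Dict.mk stateful_conf).get? "value_field")
        (pvFirstWith mapped ["metric", "value", "amount"] "metric_value"))
  let signature_field :=
    pvOrStr ((PySem.Dict.mk verify_conf).get? "signature_field")
      (pvFirstWith mapped ["sign", "hash", "auth"] "security_hash")
  let computed_field := (PySem.Dict.mk stateful_conf).getD "computed_field" "computed_metric"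
  [("entity_field", entity_field), ("time_field", time_field),
   ("value_field", value_field), ("signature_field", signature_field),
   ("computed_field", computed_field)]

-- ===== PORT B =====

-- one slot update: keep the slot once filled, else take the field if a token matches
def pvSlotStep (tokens : List String) (o : Option String) (lowered : String) (f : String) : Option String :=
  match o with
  | some _ => o
  | none => if tokens.any (fun t => PySem.Str.isIn t lowered) then some f else none

def pvScanStep (st : Option String × Option String × Option String × Option String)
    (c : List (String × String)) : Option String × Option String × Option String × Option String :=
  match pvExtract c with
  | none => st
  | some f =>
      let lowered := PySem.Str.lower f
      (pvSlotStep ["entity", "name"] st.1 lowered f,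
       pvSlotStep ["time", "timestamp", "period"] st.2.1 lowered f,
       pvSlotStep ["metric", "value", "amount"] st.2.2.1 lowered f,
       pvSlotStep ["sign", "hash", "auth"] st.2.2.2 lowered f)

def resolve_internal_fields_py_alt (schema_columns : List (List (String × String))) (verify_conf : List (String × String)) (stateful_conf : List (String × String)) : List (String × String) :=
  let st := schema_columns.foldl pvScanStep (none, none, none, none)
  [("entity_field", st.1.getD "entity_name"),
   ("time_field", st.2.1.getD "time_period"),
   ("value_field",
     pvOrStr ((PySem.Dict.mk verify_conf).get? "value_field")
       (pvOrStr ((PySem.Dict.mk stateful_conf).get? "value_field")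
         (st.2.2.1.getD "metric_value"))),
   ("signature_field",
     pvOrStr ((PySem.Dict.mk verify_conf).get? "signature_field")
       (st.2.2.2.getD "security_hash")),
   ("computed_field", (PySem.Dict.mk stateful_conf).getD "computed_field" "computed_metric")]

-- ===== PRECONDITION & SPEC =====
def Spec_resolve_internal_fields_py (schema_columns : List (List (String × String))) (verify_conf : List (String × String)) (stateful_conf : List (String × String)) (out : List (String × String)) : Prop := out = resolve_internal_fields_py_alt schema_columns verify_conf stateful_conf
instance (schema_columns : List (List (String × String))) (verify_conf : List (String × String)) (stateful_conf : List (String × String)) (out : List (String × String)) : Decidable (Spec_resolve_internal_fields_py schema_columns verify_conf stateful_conf out) := by unfold Spec_resolve_internal_fields_py; infer_instance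

-- ===== CLAIM (what is proved, stated in full; the proofs are below) =====
def Claim_equal_resolve_internal_fields_py : Prop := ∀ (schema_columns : List (List (String × String))) (verify_conf : List (String × String)) (stateful_conf : List (String × String)), Dom_resolve_internal_fields_py schema_columns verify_conf stateful_conf → Spec_resolve_internal_fields_py schema_columns verify_conf stateful_conf (resolve_internal_fields_py schema_columns verify_conf stateful_conf)

-- ===== LEMMAS AND PROOFS =====

-- a single slot, folded on its own
def pvSlotFold (tokens : List String) (cols : List (List (String × String))) (init : Option String) : Option String :=
  cols.foldl (fun o c =>
    match pvExtract c with
    | none => o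
    | some f => pvSlotStep tokens o (PySem.Str.lower f) f) init

lemma pvSlotFold_cons (tokens : List String) (c : List (String × String))
    (cols : List (List (String × String))) (init : Option String) :
    pvSlotFold tokens (c :: cols) init
      = pvSlotFold tokens cols
          (match pvExtract c with
           | none => init
           | some f => pvSlotStep tokens init (PySem.Str.lower f) f) := rfl

lemma pvScanStep_decomp (cols : List (List (String × String))) :
    ∀ (e t m s : Option String),
    cols.foldl pvScanStep (e, t, m, s)
      = (pvSlotFold ["entity", "name"] cols e,
         pvSlotFold ["time", "timestamp", "period"] cols t,
         pvSlotFold ["metric", "value", "amount"] cols m,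
         pvSlotFold ["sign", "hash", "auth"] cols s) := by
  induction cols with
  | nil => intro e t m s; rfl
  | cons c cols ih =>
    intro e t m s
    simp only [List.foldl_cons, pvSlotFold_cons, pvScanStep]
    cases pvExtract c with
    | none => exact ih e t m s
    | some f => exact ih _ _ _ _

lemma pvSlotFold_some (tokens : List String) (cols : List (List (String × String))) (s : String) :
    pvSlotFold tokens cols (some s) = some s := by
  induction cols with
  | nil => rfl
  | cons c cols ih =>
    rw [pvSlotFold_cons]
    cases pvExtract c with
    | none => exact ih
    | some f => simp only [pvSlotStep]; exact ih

lemma pvFirstWith_eq_slotFold (tokens : List String) (fb : String)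
    (cols : List (List (String × String))) :
    pvFirstWith (pvMapped cols) tokens fb = (pvSlotFold tokens cols none).getD fb := by
  induction cols with
  | nil => rfl
  | cons c cols ih =>
    rw [pvSlotFold_cons]
    simp only [pvMapped, List.filterMap_cons]
    cases pvExtract c with
    | none => exact ih
    | some f =>
      simp only [pvFirstWith, pvSlotStep]
      by_cases hm : tokens.any (fun t => PySem.Str.isIn t (PySem.Str.lower f)) = true
      · simp only [hm, if_true, pvSlotFold_some, Option.getD_some]
      · simp only [hm]; exact ih

-- ===== VERDICT (by name: the statement is the Claim_ definition above) =====
theorem resolve_internal_fields_py_spec : Claim_equal_resolve_internal_fields_py := by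
  intro cols v s _
  show _ = _
  simp only [resolve_internal_fields_py, resolve_internal_fields_py_alt,
    pvScanStep_decomp cols none none none none, pvFirstWith_eq_slotFold]
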